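-- pv_equiv track=rewrite | github.com/muohannedxd/arkive | arkive-backend/users-service/models/users.py | filter_users
-- ===== SOURCE A (Python) =====
-- def apply_filter(user, key, value):
--     return user.get(key) == value
--
-- def filter_users(users, filters):
--     if not filters:
--         return users
--
--     filtered_users = users
--     for key, value in filters.items():  # Iterate over key-value pairs
--         filtered_users = [
--             user for user in filtered_users if apply_filter(user, key, value)
--         ]
--
--     return filtered_users
-- ===== SOURCE B (Python) =====
-- def filter_users(users, filters):
--     if not filters:
--         return users
--     return [u for u in users if all(u.get(k) == v for k, v in filters.items())]
-- ===== Notes on version B (the rewrite author's own statement) =====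
-- stated objective: idiomatic
-- what changed: A narrows the list once per filter key (one filtering pass per key, building an intermediate list each time); B makes a single pass over users keeping each user for which all key-value filters match via an inline all(...) check.
import Mathlib
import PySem

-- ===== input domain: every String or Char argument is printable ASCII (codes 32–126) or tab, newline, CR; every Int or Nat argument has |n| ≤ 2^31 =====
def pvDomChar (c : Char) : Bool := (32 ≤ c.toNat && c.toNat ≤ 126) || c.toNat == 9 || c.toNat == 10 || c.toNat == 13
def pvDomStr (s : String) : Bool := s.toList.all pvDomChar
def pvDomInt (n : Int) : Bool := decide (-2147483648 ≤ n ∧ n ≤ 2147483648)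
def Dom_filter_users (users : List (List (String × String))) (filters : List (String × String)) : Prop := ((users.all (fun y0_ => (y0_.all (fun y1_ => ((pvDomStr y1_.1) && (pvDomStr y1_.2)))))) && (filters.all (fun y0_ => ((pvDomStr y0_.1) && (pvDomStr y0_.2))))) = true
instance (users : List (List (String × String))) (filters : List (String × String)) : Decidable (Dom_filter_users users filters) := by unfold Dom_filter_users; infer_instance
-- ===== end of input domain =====

-- B replaces A's one-filtering-pass-per-key narrowing with a single pass over users
-- keeping users where all filters match (idiomatic; same exact result).
-- ===== PORT A =====
def apply_filter (user : List (String × String)) (key value : String) : Bool :=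
  (PySem.Dict.mk user).get? key == some value

def filter_users (users : List (List (String × String))) (filters : List (String × String)) : List (List (String × String)) :=
  if filters.isEmpty then users
  else
    filters.foldl
      (fun filtered_users kv =>
        filtered_users.filter (fun user => apply_filter user kv.1 kv.2))
      users

-- ===== PORT B =====
def filter_users_alt (users : List (List (String × String))) (filters : List (String × String)) : List (List (String × String)) :=
  if filters.isEmpty then users
  else
    users.filter (fun u =>
      filters.all (fun kv => (PySem.Dict.mk u).get? kv.1 == some kv.2))

-- ===== PRECONDITION & SPEC =====
def Spec_filter_users (users : List (List (String × String))) (filters : List (String × String)) (out : List (List (String × String))) : Prop := out = filter_users_alt users filters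
instance (users : List (List (String × String))) (filters : List (String × String)) (out : List (List (String × String))) : Decidable (Spec_filter_users users filters out) := by unfold Spec_filter_users; infer_instance

-- ===== CLAIM (what is proved, stated in full; the proofs are below) =====
def Claim_equal_filter_users : Prop := ∀ (users : List (List (String × String))) (filters : List (String × String)), Dom_filter_users users filters → Spec_filter_users users filters (filter_users users filters)

-- ===== LEMMAS AND PROOFS =====

-- ===== VERDICT (by name: the statement is the Claim_ definition above) =====
theorem foldl_filter_eq_filter_all {α β : Type} (p : β → α → Bool) :
    ∀ (fs : List β) (acc : List α),
      fs.foldl (fun acc kv => acc.filter (p kv)) acc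
        = acc.filter (fun u => fs.all (fun kv => p kv u)) := by
  intro fs
  induction fs with
  | nil => intro acc; simp
  | cons h t ih =>
    intro acc
    simp only [List.foldl_cons, ih, List.filter_filter, List.all_cons]
    exact List.filter_congr (fun a _ => by rw [Bool.and_comm])

theorem filter_users_spec : Claim_equal_filter_users := by
  intro users filters _
  unfold Spec_filter_users filter_users filter_users_alt
  by_cases h : filters.isEmpty
  · simp [h]
  · simp only [h]
    exact foldl_filter_eq_filter_all (fun kv u => apply_filter u kv.1 kv.2) filters users
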